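-- pv_equiv track=rewrite | github.com/psp515/IntroductionToComputerScience | Z1/Program/main.py | look_in_fib_for_draft
-- ===== SOURCE A (Python) =====
-- def get_fibonnacci(n):
--     if n == 0:
--         return 0
--     if n == 1:
--         return 1
--     if n==2:
--         return 1
--     return get_fibonnacci(n-1) + get_fibonnacci(n-2)
--
-- def look_in_fib_for_draft(number):
--     if number == 0: return True
--     end_counter = 0 # upper limit for searching draft
--     end_fibo = 0
--     while end_fibo < number:
--         end_counter += 1
--         end_fibo = get_fibonnacci(end_counter)
--
--         # Below is searching function it searches if draft exist
--         searching_fibbo = 0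
--         searching_counter = 0
--         while searching_fibbo < end_fibo:
--             searching_fibbo = get_fibonnacci(searching_counter)
--             if end_fibo - searching_fibbo == number:
--                 return True
--             searching_counter += 1
--     return False
--
--
--     return False
-- ===== SOURCE B (Python) =====
-- def look_in_fib_for_draft(number):
--     if number <= 0:
--         return number == 0
--     fibs = []
--     a, b = 0, 1
--     while a < number:
--         fibs.append(a)
--         a, b = b, a + b
--     fibs.append(a)  # first Fibonacci number >= number
--     fibset = set(fibs)
--     return any(f - number in fibset for f in fibs)
-- ===== Notes on version B (the rewrite author's own statement) =====
-- stated objective: faster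
-- what changed: Replaces the nested while-loops that each call an exponential recursive Fibonacci with a single iterative pass building the list of Fibonacci numbers up to the first one >= number, then one set-membership scan for a difference.
import Mathlib
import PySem

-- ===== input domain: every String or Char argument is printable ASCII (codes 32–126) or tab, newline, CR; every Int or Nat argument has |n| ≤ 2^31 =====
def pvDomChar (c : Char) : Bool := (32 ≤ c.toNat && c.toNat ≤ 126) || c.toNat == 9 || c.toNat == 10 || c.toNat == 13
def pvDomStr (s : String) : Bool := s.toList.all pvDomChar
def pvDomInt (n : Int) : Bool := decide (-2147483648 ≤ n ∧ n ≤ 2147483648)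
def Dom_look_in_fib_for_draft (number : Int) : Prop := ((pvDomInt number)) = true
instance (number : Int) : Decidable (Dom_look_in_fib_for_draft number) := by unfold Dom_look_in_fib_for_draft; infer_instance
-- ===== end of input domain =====

-- B replaces A's nested while-loops over an exponential recursive Fibonacci by one
-- iterative build of the Fibonacci list up to the first term ≥ number plus a set lookup (faster).

-- ===== PORT A =====
-- get_fibonnacci: A only ever calls it with a nonnegative counter, so the index is Nat.
def getFib : Nat → Int
  | 0 => 0
  | 1 => 1
  | 2 => 1
  | (n+3) => getFib (n+2) + getFib (n+1)

-- the inner 'while searching_fibbo < end_fibo' loop; fuel only makes the recursion total,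
-- it is always sufficient at the call site below.
def innerA (number ef : Int) : Nat → Nat → Int → Bool
  | 0, _, _ => false
  | fuel+1, sc, sf =>
    if sf < ef then
      let sf' := getFib sc
      if ef - sf' = number then true
      else innerA number ef fuel (sc+1) sf'
    else false

-- the outer 'while end_fibo < number' loop (fuel likewise only for totality).
def outerA (number : Int) : Nat → Nat → Int → Bool
  | 0, _, _ => false
  | fuel+1, ec, ef =>
    if ef < number then
      let ec' := ec + 1
      let ef' := getFib ec'
      if innerA number ef' (ec' + 2) 0 0 then true
      else outerA number fuel ec' ef'
    else false

def look_in_fib_for_draft (number : Int) : Bool :=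
  if number = 0 then true
  else outerA number (number.toNat + 2) 0 0

-- ===== PORT B =====
-- Source B's while loop: collects a = fib 0, fib 1, … while a < number, then the first fib ≥ number.
def fibsB (number : Int) : Nat → Int → Int → List Int
  | 0, a, _ => [a]
  | fuel+1, a, b => if a < number then a :: fibsB number fuel b (a+b) else [a]

def look_in_fib_for_draft_alt (number : Int) : Bool :=
  if number ≤ 0 then decide (number = 0)
  else
    let fibs := fibsB number (number.toNat + 2) 0 1
    let fibset := PySem.Set.ofList fibs
    fibs.any (fun f => decide ((f - number) ∈ fibset))

-- ===== PRECONDITION & SPEC =====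
def Spec_look_in_fib_for_draft (number : Int) (out : Bool) : Prop := out = look_in_fib_for_draft_alt number
instance (number : Int) (out : Bool) : Decidable (Spec_look_in_fib_for_draft number out) := by unfold Spec_look_in_fib_for_draft; infer_instance

-- ===== CLAIM (what is proved, stated in full; the proofs are below) =====
def Claim_equal_look_in_fib_for_draft : Prop := ∀ (number : Int), Dom_look_in_fib_for_draft number → Spec_look_in_fib_for_draft number (look_in_fib_for_draft number)

-- ===== LEMMAS AND PROOFS =====

lemma getFib_nonneg : ∀ n, 0 ≤ getFib n := by
  intro n
  induction n using Nat.strong_induction_on with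
  | _ n ih =>
    match n with
    | 0 => simp [getFib]
    | 1 => simp [getFib]
    | 2 => simp [getFib]
    | (m+3) =>
      have h1 := ih (m+2) (by omega)
      have h2 := ih (m+1) (by omega)
      simp only [getFib]; omega

lemma getFib_add : ∀ n, getFib n + getFib (n+1) = getFib (n+2) := by
  intro n
  match n with
  | 0 => decide
  | 1 => decide
  | (m+2) => simp only [getFib]; ring

lemma getFib_le_succ : ∀ n, getFib n ≤ getFib (n+1) := by
  intro n
  match n with
  | 0 => decide
  | 1 => decide
  | (m+2) =>
    have h0 : (0:Int) ≤ getFib (m+1) := getFib_nonneg (m+1)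
    have h : getFib (m+1) + getFib (m+2) = getFib (m+3) := getFib_add (m+1)
    show getFib (m+2) ≤ getFib (m+3)
    omega

lemma getFib_mono {m n : Nat} (h : m ≤ n) : getFib m ≤ getFib n := by
  induction n with
  | zero => simp [Nat.le_zero.mp h]
  | succ k ih =>
    rcases Nat.lt_or_ge m (k+1) with hlt | hge
    · exact le_trans (ih (by omega)) (getFib_le_succ k)
    · have : m = k + 1 := by omega
      simp [this]

lemma getFib_one_le {n : Nat} (h : 1 ≤ n) : 1 ≤ getFib n := by
  have := getFib_mono h
  simpa [getFib] using this

lemma getFib_ge_sub_one : ∀ n : Nat, (n : Int) - 1 ≤ getFib n := by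
  intro n
  induction n using Nat.strong_induction_on with
  | _ n ih =>
    match n with
    | 0 => decide
    | 1 => decide
    | 2 => decide
    | (m+3) =>
      have h1 := ih (m+2) (by omega)
      have h2 : 1 ≤ getFib (m+1) := getFib_one_le (by omega)
      simp only [getFib]
      push_cast
      omega

lemma exists_fib_ge (n : Int) : ∃ k : Nat, n ≤ getFib k := by
  refine ⟨n.toNat + 1, ?_⟩
  have h := getFib_ge_sub_one (n.toNat + 1)
  have : n ≤ (n.toNat : Int) := Int.self_le_toNat n
  push_cast at h
  omega

-- K n: the least Fibonacci index whose value is ≥ n (the last index both programs scan).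
def Kfib (n : Int) : Nat := Nat.find (exists_fib_ge n)

lemma Kfib_spec (n : Int) : n ≤ getFib (Kfib n) := Nat.find_spec (exists_fib_ge n)

lemma Kfib_min {n : Int} {m : Nat} (h : m < Kfib n) : getFib m < n := by
  have := Nat.find_min (exists_fib_ge n) h
  omega

lemma Kfib_le (n : Int) : Kfib n ≤ n.toNat + 1 := by
  apply Nat.find_le
  have h := getFib_ge_sub_one (n.toNat + 1)
  have : n ≤ (n.toNat : Int) := Int.self_le_toNat n
  push_cast at h
  omega

-- index normalization: a Fibonacci value smaller than getFib k occurs at an index < k.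
lemma fib_idx_lt {v : Int} {j k : Nat} (hj : getFib j = v) (hv : v < getFib k) :
    ∃ i < k, getFib i = v := by
  rcases Nat.lt_or_ge j k with h | h
  · exact ⟨j, h, hj⟩
  · have := getFib_mono h
    omega

-- ===== inner loop characterisation =====
lemma innerA_true_exists {n ef : Int} :
    ∀ fuel sc sf, innerA n ef fuel sc sf = true → ∃ j, ef - getFib j = n := by
  intro fuel
  induction fuel with
  | zero => intro sc sf h; simp [innerA] at h
  | succ f ih =>
    intro sc sf h
    simp only [innerA] at h
    split_ifs at h with h1 h2
    · exact ⟨sc, h2⟩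
    · exact ih (sc+1) (getFib sc) h

lemma innerA_complete {n ef : Int} (hn : 0 < n) :
    ∀ fuel sc sf (j : Nat), sc ≤ j → ef - getFib j = n → sf ≤ getFib j →
      j - sc < fuel → innerA n ef fuel sc sf = true := by
  intro fuel
  induction fuel with
  | zero => intro sc sf j _ _ _ h; omega
  | succ f ih =>
    intro sc sf j hscj heq hsf hfuel
    simp only [innerA]
    have hlt : sf < ef := by omega
    rw [if_pos hlt]
    by_cases hc : ef - getFib sc = n
    · simp [hc]
    · rw [if_neg hc]
      have hne : sc ≠ j := by intro h; exact hc (h ▸ heq)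
      exact ih (sc+1) (getFib sc) j (by omega) heq
        (by have := getFib_mono (show sc ≤ j by omega); omega) (by omega)

-- ===== outer loop characterisation =====
lemma outerA_true_exists {n : Int} :
    ∀ fuel ec ef, outerA n fuel ec ef = true → ∃ k j : Nat, getFib k - getFib j = n := by
  intro fuel
  induction fuel with
  | zero => intro ec ef h; simp [outerA] at h
  | succ f ih =>
    intro ec ef h
    simp only [outerA] at h
    split_ifs at h with h1 h2
    · obtain ⟨j, hj⟩ := innerA_true_exists _ _ _ h2
      exact ⟨ec + 1, j, by omega⟩
    · exact ih (ec+1) (getFib (ec+1)) h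

lemma outerA_complete {n : Int} (hn : 0 < n) {k j : Nat}
    (_hk1 : 1 ≤ k) (hkK : k ≤ Kfib n) (hjk : j < k) (heq : getFib k - getFib j = n) :
    ∀ fuel ec, ec < k → k - ec < fuel → outerA n fuel ec (getFib ec) = true := by
  intro fuel
  induction fuel with
  | zero => intro ec _ h; omega
  | succ f ih =>
    intro ec heck hfuel
    simp only [outerA]
    have hcond : getFib ec < n := Kfib_min (by omega)
    rw [if_pos hcond]
    by_cases hin : innerA n (getFib (ec+1)) (ec + 1 + 2) 0 0 = true
    · simp [hin]
    · rw [if_neg (by simpa using hin)]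
      have hne : ec + 1 ≠ k := by
        intro h
        apply hin
        apply innerA_complete hn _ 0 0 j (Nat.zero_le j) (h ▸ heq) (getFib_nonneg j)
        omega
      exact ih (ec+1) (by omega) (by omega)

-- witness reduction: any Fibonacci-difference representation of n > 0 yields one with
-- j < k ≤ Kfib n (so both indices lie in the range either program scans).
lemma reduce_witness {n : Int} (hn : 0 < n) :
    ∀ k j : Nat, getFib k - getFib j = n →
      ∃ k' j' : Nat, 1 ≤ k' ∧ j' < k' ∧ k' ≤ Kfib n ∧ getFib k' - getFib j' = n := by
  intro k
  induction k using Nat.strong_induction_on with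
  | _ k ih =>
    intro j heq
    have hjv : getFib j < getFib k := by omega
    obtain ⟨j0, hj0k, hj0⟩ := fib_idx_lt rfl hjv
    have heq0 : getFib k - getFib j0 = n := by omega
    have hk1 : 1 ≤ k := by omega
    rcases le_or_gt k (Kfib n) with hle | hgt
    · exact ⟨k, j0, hk1, hj0k, hle, heq0⟩
    · have hK1 : 1 ≤ Kfib n := by
        by_contra h
        have h0 : Kfib n = 0 := by omega
        have := Kfib_spec n
        rw [h0] at this
        simp [getFib] at this
        omega
      have hk2 : 2 ≤ k := by omega
      obtain ⟨m, hm⟩ : ∃ m, k = m + 2 := ⟨k - 2, by omega⟩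
      subst hm
      have hsplit := getFib_add m
      have hj0le : getFib j0 ≤ getFib (m+1) := getFib_mono (by omega)
      rcases eq_or_lt_of_le hj0le with hcase | hcase
      · -- n = getFib m = getFib m - getFib 0
        have : getFib m - getFib 0 = n := by simp [getFib]; omega
        exact ih m (by omega) 0 this
      · -- getFib j0 < getFib (m+1): then n = getFib (m+1), a Fibonacci value
        have hj0m : j0 < m + 1 := by
          by_contra h
          have := getFib_mono (show m + 1 ≤ j0 by omega)
          omega
        have hj0m' : getFib j0 ≤ getFib m := getFib_mono (by omega)
        have hge : getFib (m+1) ≤ n := by omega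
        have hle' : n ≤ getFib (m+1) := by
          have := Kfib_spec n
          have := getFib_mono (show Kfib n ≤ m + 1 by omega)
          omega
        have : getFib (m+1) - getFib 0 = n := by simp [getFib]; omega
        exact ih (m+1) (by omega) 0 this

-- ===== B's list characterisation =====
lemma fibsB_eq_map {n : Int} :
    ∀ fuel i, i ≤ Kfib n → Kfib n - i < fuel →
      fibsB n fuel (getFib i) (getFib (i+1)) = (List.range' i (Kfib n - i + 1)).map getFib := by
  intro fuel
  induction fuel with
  | zero => intro i _ h; omega
  | succ f ih =>
    intro i hiK hfuel
    simp only [fibsB]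
    rcases Nat.lt_or_ge i (Kfib n) with hlt | hge
    · rw [if_pos (Kfib_min hlt)]
      rw [getFib_add i]
      rw [ih (i+1) (by omega) (by omega)]
      rw [show Kfib n - i + 1 = (Kfib n - (i+1) + 1) + 1 from by omega]
      simp [List.range'_succ]
    · have hiK' : i = Kfib n := by omega
      have : ¬ getFib i < n := by
        have := Kfib_spec n
        rw [hiK']; omega
      rw [if_neg this, hiK']
      simp

lemma mem_fibsB {n : Int} {v : Int} :
    v ∈ fibsB n (n.toNat + 2) 0 1 ↔ ∃ i ≤ Kfib n, getFib i = v := by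
  have h0 : (0 : Int) = getFib 0 := rfl
  have h1 : (1 : Int) = getFib 1 := rfl
  rw [h0, h1, fibsB_eq_map _ 0 (Nat.zero_le _) (by have := Kfib_le n; omega)]
  simp only [List.mem_map]
  constructor
  · rintro ⟨i, hi, rfl⟩
    refine ⟨i, ?_, rfl⟩
    simp only [List.mem_range'_1] at hi
    omega
  · rintro ⟨i, hi, rfl⟩
    refine ⟨i, ?_, rfl⟩
    simp only [List.mem_range'_1]
    omega

-- ===== VERDICT (by name: the statement is the Claim_ definition above) =====
theorem look_in_fib_for_draft_spec : Claim_equal_look_in_fib_for_draft := by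
  intro number _
  unfold Spec_look_in_fib_for_draft
  unfold look_in_fib_for_draft look_in_fib_for_draft_alt
  rcases lt_trichotomy number 0 with hneg | hzero | hpos
  · -- negative: A's outer loop body never runs; B's branch returns false
    rw [if_neg (by omega), if_pos (by omega)]
    have ht : number.toNat = 0 := Int.toNat_of_nonpos (by omega)
    rw [ht]
    simp only [outerA]
    rw [if_neg (by omega)]
    simp; omega
  · subst hzero; simp
  · rw [if_neg (by omega), if_neg (by omega)]
    have hAiff : outerA number (number.toNat + 2) 0 0 = true ↔
        ∃ k j : Nat, getFib k - getFib j = number := by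
      constructor
      · exact outerA_true_exists _ _ _
      · rintro ⟨k, j, hkj⟩
        obtain ⟨k', j', hk1, hjk, hkK, heq⟩ := reduce_witness hpos k j hkj
        have h0 : (0 : Int) = getFib 0 := rfl
        rw [h0]
        exact outerA_complete hpos hk1 hkK hjk heq _ 0 (by omega)
          (by have := Kfib_le number; omega)
    have hBiff : (∃ f ∈ fibsB number (number.toNat + 2) 0 1,
        f - number ∈ fibsB number (number.toNat + 2) 0 1) ↔
        ∃ k j : Nat, getFib k - getFib j = number := by
      constructor
      · rintro ⟨f, hf, hfn⟩
        obtain ⟨i, hi, rfl⟩ := (mem_fibsB).mp hf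
        obtain ⟨j, hj, hje⟩ := (mem_fibsB).mp hfn
        exact ⟨i, j, by omega⟩
      · rintro ⟨k, j, hkj⟩
        obtain ⟨k', j', hk1, hjk, hkK, heq⟩ := reduce_witness hpos k j hkj
        refine ⟨getFib k', (mem_fibsB).mpr ⟨k', hkK, rfl⟩, ?_⟩
        exact (mem_fibsB).mpr ⟨j', by omega, by omega⟩
    rw [Bool.eq_iff_iff]
    simp only [List.any_eq_true, decide_eq_true_eq, PySem.Set.mem_ofList]
    rw [hAiff]
    exact hBiff.symm
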